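-- pv_equiv track=rewrite | github.com/SaarShai/Primes-Equispaced | experiments/step1_analytical_proof.py | hyperbolic_identity
-- ===== SOURCE A (Python) =====
-- def hyperbolic_identity(p, N, mu_arr):
--     """
--     Compute Σ_{k=1}^{p-1} T(k)² where T(k) = Σ_{d≤N} μ(d) Σ_{e≤N/d} ⌊ke/p⌋.
--
--     We can write T(k) = Σ_{d≤N} μ(d) · S(k, ⌊N/d⌋)
--     where S(k, M) = Σ_{e=1}^{M} ⌊ke/p⌋.
--
--     Then: Σ_k T(k)² = Σ_{d1,d2} μ(d1)μ(d2) · Σ_k S(k,M1)·S(k,M2)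
--
--     The inner sum Σ_k S(k,M1)·S(k,M2) is a sum of products of floor functions,
--     which connects to reciprocity laws for Dedekind sums.
--
--     For now, we just compute this directly and verify the identity.
--     """
--
--     # Precompute S(k, M) for all needed M values
--     M_values = set()
--     for d in range(1, N + 1):
--         if mu_arr[d] != 0:
--             M_values.add(N // d)
--
--     # Compute S(k, M) for each k and M
--     S_cache = {}
--     for M in M_values:
--         for k in range(1, p):
--             val = sum(k * e // p for e in range(1, M + 1))
--             S_cache[(k, M)] = val
--
--     # Compute T(k) and Σ T(k)²
--     sum_T_sq = 0
--     T_values = []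
--     for k in range(1, p):
--         T = 0
--         for d in range(1, N + 1):
--             if mu_arr[d] == 0:
--                 continue
--             M = N // d
--             T += mu_arr[d] * S_cache[(k, M)]
--         T_values.append(T)
--         sum_T_sq += T * T
--
--     return sum_T_sq, T_values
-- ===== SOURCE B (Python) =====
-- def hyperbolic_identity(p, N, mu_arr):
--     """Divisor-swap: T(k) = sum_{e<=N} W(N//e) * (k*e//p) with W the prefix sums
--     of mu_arr, so no S(k,M) cache and no per-(k,M) inner loop is needed."""
--     # prefix[m] = mu_arr[1] + ... + mu_arr[m]
--     prefix = [0]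
--     for d in range(1, N + 1):
--         prefix.append(prefix[-1] + mu_arr[d])
--     w = [prefix[N // e] for e in range(1, N + 1)]
--     sum_T_sq = 0
--     T_values = []
--     for k in range(1, p):
--         T = 0
--         for e in range(1, N + 1):
--             T += w[e - 1] * (k * e // p)
--         T_values.append(T)
--         sum_T_sq += T * T
--     return sum_T_sq, T_values
-- ===== Notes on version B (the rewrite author's own statement) =====
-- stated objective: faster
-- what changed: B swaps the divisor sum (hyperbola method): T(k) = sum_{e<=N} W(N//e)*(k*e//p) with W the prefix sums of mu_arr computed once, so the S(k,M) cache over all distinct M values and its per-(k,M) inner summation loop disappear; intended as faster, measured 4x-6x by the check at every size where both finish (both timed out at the largest probe size).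
import Mathlib
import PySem

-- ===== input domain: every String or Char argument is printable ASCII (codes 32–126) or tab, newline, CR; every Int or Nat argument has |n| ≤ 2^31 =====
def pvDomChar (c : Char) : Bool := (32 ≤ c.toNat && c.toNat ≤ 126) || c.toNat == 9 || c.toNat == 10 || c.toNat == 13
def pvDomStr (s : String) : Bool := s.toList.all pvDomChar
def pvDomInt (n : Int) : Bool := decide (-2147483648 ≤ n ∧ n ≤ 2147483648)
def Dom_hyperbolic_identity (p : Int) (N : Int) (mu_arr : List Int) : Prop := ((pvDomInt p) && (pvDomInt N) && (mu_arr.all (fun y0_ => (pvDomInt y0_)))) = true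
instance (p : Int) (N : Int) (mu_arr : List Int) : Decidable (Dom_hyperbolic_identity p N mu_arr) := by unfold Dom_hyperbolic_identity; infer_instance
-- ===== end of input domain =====

-- B replaces A's per-(k,M) floor-sum cache by a single prefix-sum array of mu_arr and the
-- divisor-swap identity T(k) = Σ_{e≤N} W(N//e)·⌊ke/p⌋; intended as faster, measured 4x-6x by
-- a timing run at every size where both versions finished.

-- ===== PORT A =====
-- A-side helper: sum(k * e // p for e in range(1, M + 1))
def pySumFloors (p k M : Int) : Int :=
  (PySem.List.pyRange 1 (M + 1) 1).foldl (fun a e => a + PySem.Int.floordiv (k * e) p) 0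

def hyperbolic_identity (p : Int) (N : Int) (mu_arr : List Int) : Int × List Int :=
  -- M_values = set(); for d in range(1, N+1): if mu_arr[d] != 0: M_values.add(N // d)
  let M_values : PySem.Set Int :=
    (PySem.List.pyRange 1 (N + 1) 1).foldl
      (fun s d => if PySem.List.pyGetD mu_arr d 0 ≠ 0
                  then PySem.Set.add s (PySem.Int.floordiv N d) else s)
      PySem.Set.empty
  -- S_cache = {}; for M in M_values: for k in range(1, p): S_cache[(k, M)] = val
  -- (iterating the set in list order is sound: the dict is only looked up afterwards)
  let S_cache : PySem.Dict (Int × Int) Int :=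
    M_values.foldl
      (fun c M => (PySem.List.pyRange 1 p 1).foldl
                    (fun c k => c.insert (k, M) (pySumFloors p k M)) c)
      PySem.Dict.empty
  -- S_cache[(k, M)]: ported as getD 0; the key is always present when this line runs
  -- (same mu_arr[d] != 0 test as the M_values loop), so Python's KeyError is unreachable
  let res :=
    (PySem.List.pyRange 1 p 1).foldl
      (fun (st : Int × List Int) k =>
        let T :=
          (PySem.List.pyRange 1 (N + 1) 1).foldl
            (fun T d => if PySem.List.pyGetD mu_arr d 0 = 0 then T
                        else T + PySem.List.pyGetD mu_arr d 0 *
                               S_cache.getD (k, PySem.Int.floordiv N d) 0)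
            0
        (st.1 + T * T, st.2 ++ [T]))
      (0, [])
  (res.1, res.2)

-- ===== PORT B =====
def hyperbolic_identity_alt (p : Int) (N : Int) (mu_arr : List Int) : Int × List Int :=
  -- prefix = [0]; for d in range(1, N+1): prefix.append(prefix[-1] + mu_arr[d])
  let pref : List Int :=
    (PySem.List.pyRange 1 (N + 1) 1).foldl
      (fun pr d => pr ++ [PySem.List.pyGetD pr (-1) 0 + PySem.List.pyGetD mu_arr d 0])
      [0]
  -- w = [prefix[N // e] for e in range(1, N + 1)]
  let w : List Int :=
    (PySem.List.pyRange 1 (N + 1) 1).map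
      (fun e => PySem.List.pyGetD pref (PySem.Int.floordiv N e) 0)
  let res :=
    (PySem.List.pyRange 1 p 1).foldl
      (fun (st : Int × List Int) k =>
        let T :=
          (PySem.List.pyRange 1 (N + 1) 1).foldl
            (fun T e => T + PySem.List.pyGetD w (e - 1) 0 * PySem.Int.floordiv (k * e) p)
            0
        (st.1 + T * T, st.2 ++ [T]))
      (0, [])
  (res.1, res.2)

-- ===== PRECONDITION & SPEC =====
-- Pre_ excludes exactly the inputs where Python A raises IndexError: mu_arr[d] is read for
-- every d in range(1, N+1), so A returns normally iff N ≤ 0 or N < len(mu_arr).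
def Pre_hyperbolic_identity (p : Int) (N : Int) (mu_arr : List Int) : Prop :=
  N ≤ 0 ∨ N < PySem.List.len mu_arr
instance (p : Int) (N : Int) (mu_arr : List Int) : Decidable (Pre_hyperbolic_identity p N mu_arr) := by unfold Pre_hyperbolic_identity; infer_instance

def pvWitness_hyperbolic_identity : Int × Int × List Int := (3, 2, [0, 1, -1])

def Spec_hyperbolic_identity (p : Int) (N : Int) (mu_arr : List Int) (out : Int × List Int) : Prop := out = hyperbolic_identity_alt p N mu_arr
instance (p : Int) (N : Int) (mu_arr : List Int) (out : Int × List Int) : Decidable (Spec_hyperbolic_identity p N mu_arr out) := by unfold Spec_hyperbolic_identity; infer_instance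

-- ===== CLAIM (what is proved, stated in full; the proofs are below) =====
def Claim_equal_hyperbolic_identity : Prop := ∀ (p : Int) (N : Int) (mu_arr : List Int), Dom_hyperbolic_identity p N mu_arr → Pre_hyperbolic_identity p N mu_arr → Spec_hyperbolic_identity p N mu_arr (hyperbolic_identity p N mu_arr)

-- ===== LEMMAS AND PROOFS =====

-- proof-side abbreviations (used only below the claim block)
def muF (mu : List Int) (d : Int) : Int := PySem.List.pyGetD mu d 0

def PmF (mu : List Int) (m : Int) : Int := ((PySem.List.pyRange 1 (m + 1) 1).map (muF mu)).sum

def PmFn (mu : List Int) (m : Nat) : Int := PmF mu (m : Int)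

def pvR (N : Int) : List Int := PySem.List.pyRange 1 (N + 1) 1

def pvMvals (N : Int) (mu : List Int) : PySem.Set Int :=
  (pvR N).foldl
    (fun s d => if PySem.List.pyGetD mu d 0 ≠ 0
                then PySem.Set.add s (PySem.Int.floordiv N d) else s)
    PySem.Set.empty

def pvCache (p N : Int) (mu : List Int) : PySem.Dict (Int × Int) Int :=
  (pvMvals N mu).foldl
    (fun c M => (PySem.List.pyRange 1 p 1).foldl
                  (fun c k => c.insert (k, M) (pySumFloors p k M)) c)
    PySem.Dict.empty

def pvTA (p N : Int) (mu : List Int) (k : Int) : Int :=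
  (pvR N).foldl
    (fun T d => if PySem.List.pyGetD mu d 0 = 0 then T
                else T + PySem.List.pyGetD mu d 0 *
                       (pvCache p N mu).getD (k, PySem.Int.floordiv N d) 0)
    0

def pvPref (N : Int) (mu : List Int) : List Int :=
  (pvR N).foldl
    (fun pr d => pr ++ [PySem.List.pyGetD pr (-1) 0 + PySem.List.pyGetD mu d 0])
    [0]

def pvW (N : Int) (mu : List Int) : List Int :=
  (pvR N).map (fun e => PySem.List.pyGetD (pvPref N mu) (PySem.Int.floordiv N e) 0)

def pvTB (p N : Int) (mu : List Int) (k : Int) : Int :=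
  (pvR N).foldl
    (fun T e => T + PySem.List.pyGetD (pvW N mu) (e - 1) 0 * PySem.Int.floordiv (k * e) p)
    0

lemma hyperbolic_identity_def (p N : Int) (mu : List Int) :
    hyperbolic_identity p N mu =
      ((PySem.List.pyRange 1 p 1).foldl
        (fun (st : Int × List Int) k => (st.1 + pvTA p N mu k * pvTA p N mu k, st.2 ++ [pvTA p N mu k]))
        (0, [])) := rfl

lemma hyperbolic_identity_alt_def (p N : Int) (mu : List Int) :
    hyperbolic_identity_alt p N mu =
      ((PySem.List.pyRange 1 p 1).foldl
        (fun (st : Int × List Int) k => (st.1 + pvTB p N mu k * pvTB p N mu k, st.2 ++ [pvTB p N mu k]))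
        (0, [])) := rfl

-- list sum over range(1, n+1) as a Finset sum
lemma pySum_eq (n : Nat) (f : Int → Int) :
    ((PySem.List.pyRange 1 ((n : Int) + 1) 1).map f).sum = ∑ j ∈ Finset.Icc 1 n, f (j : Int) := by
  induction n with
  | zero => simp [PySem.List.pyRange_one_eq_nil]
  | succ n ih =>
    rw [show ((n + 1 : Nat) : Int) + 1 = ((n : Int) + 1) + 1 by push_cast; ring,
        PySem.List.pyRange_one_succ_right (by omega), List.map_append, List.sum_append,
        ih, Finset.sum_Icc_succ_top (by omega)]
    push_cast
    simp

lemma pvIcc_div (n a : Nat) (ha : 1 ≤ a) :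
    Finset.Icc 1 (n / a) = (Finset.Icc 1 n).filter (fun b => a * b ≤ n) := by
  ext b
  simp only [Finset.mem_Icc, Finset.mem_filter]
  constructor
  · rintro ⟨h1, h2⟩
    have hab : b * a ≤ n := (Nat.le_div_iff_mul_le (by omega)).1 h2
    have hbn : b ≤ n := le_trans (Nat.le_mul_of_pos_right b (by omega)) hab
    exact ⟨⟨h1, hbn⟩, by rw [Nat.mul_comm]; exact hab⟩
  · rintro ⟨⟨h1, _⟩, h3⟩
    rw [Nat.mul_comm] at h3
    exact ⟨h1, (Nat.le_div_iff_mul_le (by omega)).2 h3⟩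

-- divisor swap on Finset sums (the hyperbola-method identity)
lemma pvSwap (n : Nat) (g h : Nat → Int) :
    ∑ d ∈ Finset.Icc 1 n, g d * (∑ e ∈ Finset.Icc 1 (n / d), h e)
      = ∑ e ∈ Finset.Icc 1 n, (∑ d ∈ Finset.Icc 1 (n / e), g d) * h e := by
  have L : ∀ d ∈ Finset.Icc 1 n, g d * (∑ e ∈ Finset.Icc 1 (n / d), h e)
      = ∑ e ∈ Finset.Icc 1 n, if d * e ≤ n then g d * h e else 0 := by
    intro d hd
    rw [pvIcc_div n d (Finset.mem_Icc.1 hd).1, Finset.mul_sum, Finset.sum_filter]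
  have Rr : ∀ e ∈ Finset.Icc 1 n, (∑ d ∈ Finset.Icc 1 (n / e), g d) * h e
      = ∑ d ∈ Finset.Icc 1 n, if d * e ≤ n then g d * h e else 0 := by
    intro e he
    rw [pvIcc_div n e (Finset.mem_Icc.1 he).1, Finset.sum_mul, Finset.sum_filter]
    exact Finset.sum_congr rfl (fun d _ => by rw [Nat.mul_comm e d])
  rw [Finset.sum_congr rfl L, Finset.sum_congr rfl Rr, Finset.sum_comm]

lemma pvCache_inner (p M : Int) (ks : List Int) (c : PySem.Dict (Int × Int) Int) (k0 M0 : Int) :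
    (ks.foldl (fun c k => c.insert (k, M) (pySumFloors p k M)) c).getD (k0, M0) 0
      = if k0 ∈ ks ∧ M0 = M then pySumFloors p k0 M0 else c.getD (k0, M0) 0 := by
  induction ks generalizing c with
  | nil => simp
  | cons k t ih =>
    rw [List.foldl_cons, ih]
    by_cases h1 : k0 ∈ t ∧ M0 = M
    · rw [if_pos h1, if_pos ⟨List.mem_cons_of_mem k h1.1, h1.2⟩]
    · rw [if_neg h1, PySem.Dict.getD_insert]
      by_cases h2 : k0 = k ∧ M0 = M
      · rw [if_pos (by simp [h2.1, h2.2]), if_pos ⟨by simp [h2.1], h2.2⟩, h2.1, h2.2]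
      · have hne : ¬ ((k0, M0) = (k, M)) := by
          intro hx
          rw [Prod.mk.injEq] at hx
          exact h2 hx
        have hnc : ¬ (k0 ∈ k :: t ∧ M0 = M) := by
          rintro ⟨hm, hM⟩
          rcases List.mem_cons.1 hm with h | h
          · exact h2 ⟨h, hM⟩
          · exact h1 ⟨h, hM⟩
        rw [if_neg hne, if_neg hnc]

lemma pvCache_outer (p : Int) (Ms : List Int) (c : PySem.Dict (Int × Int) Int) (k0 M0 : Int) :
    (Ms.foldl (fun c M => (PySem.List.pyRange 1 p 1).foldl
                  (fun c k => c.insert (k, M) (pySumFloors p k M)) c) c).getD (k0, M0) 0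
      = if M0 ∈ Ms ∧ k0 ∈ PySem.List.pyRange 1 p 1 then pySumFloors p k0 M0
        else c.getD (k0, M0) 0 := by
  induction Ms generalizing c with
  | nil => simp
  | cons M t ih =>
    rw [List.foldl_cons, ih, pvCache_inner]
    by_cases h1 : M0 ∈ t ∧ k0 ∈ PySem.List.pyRange 1 p 1
    · rw [if_pos h1, if_pos ⟨List.mem_cons_of_mem M h1.1, h1.2⟩]
    · rw [if_neg h1]
      by_cases h2 : k0 ∈ PySem.List.pyRange 1 p 1 ∧ M0 = M
      · rw [if_pos h2, if_pos ⟨by simp [h2.2], h2.1⟩]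
      · have hnc : ¬ (M0 ∈ M :: t ∧ k0 ∈ PySem.List.pyRange 1 p 1) := by
          rintro ⟨hm, hkR⟩
          rcases List.mem_cons.1 hm with h | h
          · exact h2 ⟨hkR, h⟩
          · exact h1 ⟨h, hkR⟩
        rw [if_neg h2, if_neg hnc]

lemma pvCache_getD (p N : Int) (mu : List Int) (k0 M0 : Int)
    (hM : M0 ∈ pvMvals N mu) (hk : k0 ∈ PySem.List.pyRange 1 p 1) :
    (pvCache p N mu).getD (k0, M0) 0 = pySumFloors p k0 M0 := by
  unfold pvCache
  rw [pvCache_outer, if_pos ⟨hM, hk⟩]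

lemma mem_pvMvals (N : Int) (mu : List Int) (d : Int) (hd : d ∈ pvR N)
    (h0 : PySem.List.pyGetD mu d 0 ≠ 0) :
    PySem.Int.floordiv N d ∈ pvMvals N mu := by
  unfold pvMvals
  rw [PySem.List.foldl_ite_eq_foldl_filter (fun d => PySem.List.pyGetD mu d 0 ≠ 0)
        (fun s d => PySem.Set.add s (PySem.Int.floordiv N d))]
  exact (PySem.Set.mem_foldl_add _ _ _ _).2
    (Or.inr ⟨d, List.mem_filter.2 ⟨hd, by simpa using h0⟩, rfl⟩)

lemma pvTA_sum (p N : Int) (mu : List Int) (k : Int) (hk : k ∈ PySem.List.pyRange 1 p 1) :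
    pvTA p N mu k
      = ((pvR N).map (fun d => PySem.List.pyGetD mu d 0 *
            pySumFloors p k (PySem.Int.floordiv N d))).sum := by
  unfold pvTA
  rw [PySem.List.foldl_congr_mem _ _
        (fun T d => T + PySem.List.pyGetD mu d 0 * pySumFloors p k (PySem.Int.floordiv N d)) 0
        (by
          intro T d hd
          by_cases h0 : PySem.List.pyGetD mu d 0 = 0
          · simp [h0]
          · rw [if_neg h0, pvCache_getD p N mu k _ (mem_pvMvals N mu d hd h0) hk]),
      PySem.List.foldl_add]
  simp

lemma PmF_succ (mu : List Int) (m : Int) (hm : 0 ≤ m) :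
    PmF mu (m + 1) = PmF mu m + PySem.List.pyGetD mu (m + 1) 0 := by
  unfold PmF
  rw [PySem.List.pyRange_one_succ_right (by omega), List.map_append, List.sum_append]
  simp [muF]

lemma pvPref_nat (mu : List Int) (n : Nat) :
    (PySem.List.pyRange 1 ((n : Int) + 1) 1).foldl
        (fun pr d => pr ++ [PySem.List.pyGetD pr (-1) 0 + PySem.List.pyGetD mu d 0]) [0]
      = (List.range (n + 1)).map (PmFn mu) := by
  induction n with
  | zero => simp [PySem.List.pyRange_one_eq_nil, PmFn, PmF]
  | succ n ih =>
    rw [show ((n + 1 : Nat) : Int) + 1 = ((n : Int) + 1) + 1 by push_cast; ring,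
        PySem.List.pyRange_one_succ_right (by omega), List.foldl_append, ih,
        List.foldl_cons, List.foldl_nil]
    have hlast : PySem.List.pyGetD ((List.range (n + 1)).map (PmFn mu)) (-1) 0 = PmFn mu n := by
      rw [List.range_succ, List.map_append, List.map_singleton]
      exact PySem.List.pyGetD_neg_one_append_singleton _ _ _
    rw [hlast]
    conv_rhs => rw [List.range_succ, List.map_append, List.map_singleton]
    congr 1
    have : PmFn mu (n + 1) = PmFn mu n + PySem.List.pyGetD mu ((n : Int) + 1) 0 := by
      unfold PmFn
      rw [show ((n + 1 : Nat) : Int) = (n : Int) + 1 by push_cast; ring,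
          PmF_succ mu (n : Int) (by omega)]
    rw [this]

lemma pvPref_eq (N : Int) (mu : List Int) :
    pvPref N mu = (List.range (N.toNat + 1)).map (PmFn mu) := by
  unfold pvPref pvR
  by_cases hN : N ≤ 0
  · rw [PySem.List.pyRange_one_eq_nil (by omega), show N.toNat = 0 by omega]
    simp [PmFn, PmF, PySem.List.pyRange_one_eq_nil]
  · obtain ⟨n, rfl⟩ : ∃ n : Nat, N = (n : Int) := ⟨N.toNat, by omega⟩
    rw [Int.toNat_natCast]
    exact pvPref_nat mu n

lemma pvW_getD (N : Int) (mu : List Int) (e : Int) (he : e ∈ pvR N) :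
    PySem.List.pyGetD (pvW N mu) (e - 1) 0 = PmF mu (PySem.Int.floordiv N e) := by
  have he' : 1 ≤ e ∧ e < N + 1 := by
    simpa [pvR, PySem.List.mem_pyRange_one] using he
  have hfd : PySem.Int.floordiv N e = N / e :=
    PySem.Int.floordiv_eq_ediv_of_pos (by omega)
  have hdiv0 : 0 ≤ N / e := Int.ediv_nonneg (by omega) (by omega)
  have hdivN : N / e ≤ N := Int.ediv_le_self e (by omega : (0:Int) ≤ N)
  have hlenR : (PySem.List.pyRange 1 (N + 1) 1).length = N.toNat :=
    by rw [PySem.List.length_pyRange_one]; omega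
  unfold pvW pvR
  rw [PySem.List.pyGetD_eq_getElem _ _ (by omega)
        (by rw [List.length_map, hlenR]; omega)]
  rw [List.getElem_map, PySem.List.getElem_pyRange_one,
      show (1 : Int) + ((e - 1).toNat : Int) = e by omega, pvPref_eq]
  rw [PySem.List.pyGetD_eq_getElem _ _ (by omega)
        (by rw [List.length_map, List.length_range]; omega)]
  rw [List.getElem_map, List.getElem_range]
  unfold PmFn
  rw [hfd]
  congr 1
  omega

lemma pvTB_sum (p N : Int) (mu : List Int) (k : Int) :
    pvTB p N mu k
      = ((pvR N).map (fun e => PmF mu (PySem.Int.floordiv N e) *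
            PySem.Int.floordiv (k * e) p)).sum := by
  unfold pvTB
  rw [PySem.List.foldl_congr_mem _ _
        (fun T e => T + PmF mu (PySem.Int.floordiv N e) * PySem.Int.floordiv (k * e) p) 0
        (by intro T e he; rw [pvW_getD N mu e he]),
      PySem.List.foldl_add]
  simp

lemma pySumFloors_eq (p k M : Int) :
    pySumFloors p k M
      = ((PySem.List.pyRange 1 (M + 1) 1).map (fun e => PySem.Int.floordiv (k * e) p)).sum := by
  unfold pySumFloors
  rw [PySem.List.foldl_add]
  simp

-- the divisor-swap identity, applied to the two T(k) forms
lemma pvT_core (p k N : Int) (mu : List Int) :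
    ((pvR N).map (fun d => PySem.List.pyGetD mu d 0 *
        pySumFloors p k (PySem.Int.floordiv N d))).sum
      = ((pvR N).map (fun e => PmF mu (PySem.Int.floordiv N e) *
            PySem.Int.floordiv (k * e) p)).sum := by
  by_cases hN : N ≤ 0
  · simp [pvR, PySem.List.pyRange_one_eq_nil (by omega : N + 1 ≤ 1)]
  · obtain ⟨n, rfl⟩ : ∃ n : Nat, N = (n : Int) := ⟨N.toNat, by omega⟩
    unfold pvR
    rw [pySum_eq n, pySum_eq n]
    have h1 : (∑ d ∈ Finset.Icc 1 n, PySem.List.pyGetD mu ((d : Nat) : Int) 0 *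
                  pySumFloors p k (PySem.Int.floordiv ((n : Nat) : Int) ((d : Nat) : Int)))
        = ∑ d ∈ Finset.Icc 1 n, PySem.List.pyGetD mu ((d : Nat) : Int) 0 *
            ∑ e ∈ Finset.Icc 1 (n / d), PySem.Int.floordiv (k * ((e : Nat) : Int)) p :=
      Finset.sum_congr rfl (fun d _ => by
        rw [pySumFloors_eq, PySem.Int.floordiv_natCast n d, pySum_eq (n / d)])
    have h2 : (∑ e ∈ Finset.Icc 1 n, PmF mu (PySem.Int.floordiv ((n : Nat) : Int) ((e : Nat) : Int)) *
                  PySem.Int.floordiv (k * ((e : Nat) : Int)) p)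
        = ∑ e ∈ Finset.Icc 1 n, (∑ d ∈ Finset.Icc 1 (n / e), PySem.List.pyGetD mu ((d : Nat) : Int) 0) *
            PySem.Int.floordiv (k * ((e : Nat) : Int)) p :=
      Finset.sum_congr rfl (fun e _ => by
        rw [PySem.Int.floordiv_natCast n e]
        unfold PmF
        rw [pySum_eq (n / e)]
        simp only [muF])
    rw [h1, h2]
    exact pvSwap n (fun d => PySem.List.pyGetD mu ((d : Nat) : Int) 0)
      (fun e => PySem.Int.floordiv (k * ((e : Nat) : Int)) p)

theorem hyperbolic_identity_eq (p : Int) (N : Int) (mu_arr : List Int) :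
    hyperbolic_identity p N mu_arr = hyperbolic_identity_alt p N mu_arr := by
  rw [hyperbolic_identity_def, hyperbolic_identity_alt_def]
  rw [PySem.List.foldl_congr_mem _ _
        (fun (st : Int × List Int) k =>
          (st.1 + pvTB p N mu_arr k * pvTB p N mu_arr k, st.2 ++ [pvTB p N mu_arr k]))
        (0, [])
        (by
          intro st k hk
          rw [pvTA_sum p N mu_arr k hk, pvT_core, ← pvTB_sum])]

-- ===== VERDICT (by name: the statement is the Claim_ definition above) =====
theorem hyperbolic_identity_spec : Claim_equal_hyperbolic_identity := by
  intro p N mu_arr _ _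
  unfold Spec_hyperbolic_identity
  exact hyperbolic_identity_eq p N mu_arr
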